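-- pv_equiv track=rewrite | github.com/Agentic-Environmental-Engineering/GymVerse | gem/gem/envs/RLVE/not_containing_string_counting_env.py | _compute_reference
-- ===== SOURCE A (Python) =====
-- def _compute_reference(N: int, pattern: str, MOD: int) -> int:
--     """Compute the reference answer using KMP-based automaton and matrix exponentiation."""
--
--     def build_prefix(pat: str) -> list[int]:
--         """Build the KMP prefix function for the pattern."""
--         m = len(pat)
--         pi = [0] * m
--         j = 0
--         for i in range(1, m):
--             while j > 0 and pat[i] != pat[j]:
--                 j = pi[j - 1]
--             if pat[i] == pat[j]:
--                 j += 1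
--             pi[i] = j
--         return pi
--
--     def multiply_matrices(A: list[list[int]], B: list[list[int]], mod: int) -> list[list[int]]:
--         """Multiply two square matrices A and B under modulo mod."""
--         size = len(A)
--         C = [[0] * size for _ in range(size)]
--         for i in range(size):
--             for k in range(size):
--                 aik = A[i][k]
--                 if aik:
--                     for j in range(size):
--                         C[i][j] = (C[i][j] + aik * B[k][j]) % mod
--         return C
--
--     def matrix_power(matrix: list[list[int]], exponent: int, mod: int) -> list[list[int]]:
--         """Binary exponentiation of a square matrix under modulo mod."""
--         size = len(matrix)
--         result = [[1 if i == j else 0 for j in range(size)] for i in range(size)]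
--         base = matrix
--         e = exponent
--         while e > 0:
--             if e & 1:
--                 result = multiply_matrices(result, base, mod)
--             base = multiply_matrices(base, base, mod)
--             e >>= 1
--         return result
--
--     M = len(pattern)
--     pi = build_prefix(pattern)
--
--     # Build transition matrix of size (M+1) with an absorbing forbidden state M
--     size = M + 1
--     B = [[0] * size for _ in range(size)]
--
--     # States 0..M-1: matched prefix length so far
--     for state in range(M):
--         for digit in ("0", "1"):
--             k = state
--             while k > 0 and digit != pattern[k]:
--                 k = pi[k - 1]
--             if digit == pattern[k]:
--                 k += 1
--             B[state][k] += 1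
--
--     # State M is absorbing with both digits
--     B[M][M] = 2
--
--     # Compute B^N mod MOD
--     Bn = matrix_power(B, N, MOD)
--
--     # Sum over non-forbidden states 0..M-1
--     result = sum(Bn[0][j] for j in range(M)) % MOD
--     return result
-- ===== SOURCE B (Python) =====
-- def _compute_reference(N: int, pattern: str, MOD: int) -> int:
--     """Count length-N binary strings avoiding pattern, mod MOD.
--
--     Different route from the reference: the KMP automaton is built directly with a
--     rolling border state (no prefix-function array), the absorbing "matched" state is
--     dropped so only the M x M live-state matrix is exponentiated, multiplication is
--     comprehension-based and the power is computed by recursive halving.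
--     """
--     M = len(pattern)
--     if M == 0:
--         return 0  # every string contains the empty pattern
--
--     alphabet = sorted(set("01" + pattern))
--     aut = []  # aut[s][c] = automaton transition from live state s on character c
--     k = 0     # rolling border state: length of longest proper border of pattern[:s+1]
--     for s in range(M):
--         aut.append({c: (s + 1 if c == pattern[s] else (aut[k][c] if s else 0))
--                     for c in alphabet})
--         if s:
--             k = aut[k][pattern[s]]
--
--     # M x M transition matrix over live states only (transitions into the full
--     # match are simply dropped: those strings are forbidden).
--     T = [[sum(1 for c in "01" if aut[s][c] == t) for t in range(M)] for s in range(M)]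
--
--     def mul(X, Y):
--         return [[sum(X[i][k] * Y[k][j] for k in range(M)) % MOD for j in range(M)]
--                 for i in range(M)]
--
--     def mpow(n):
--         if n <= 0:
--             return [[1 if i == j else 0 for j in range(M)] for i in range(M)]
--         H = mpow(n // 2)
--         H2 = mul(H, H)
--         return mul(H2, T) if n % 2 else H2
--
--     return sum(mpow(N)[0]) % MOD
-- ===== Notes on version B (the rewrite author's own statement) =====
-- stated objective: alternative
-- what changed: B drops the absorbing matched state and exponentiates the M x M live-state matrix instead of A's (M+1) x (M+1) one, builds the KMP automaton directly with a rolling border state (no prefix-function array), uses comprehension-style multiplication, and computes the power by recursive halving instead of A's LSB-first loop.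
import Mathlib
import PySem

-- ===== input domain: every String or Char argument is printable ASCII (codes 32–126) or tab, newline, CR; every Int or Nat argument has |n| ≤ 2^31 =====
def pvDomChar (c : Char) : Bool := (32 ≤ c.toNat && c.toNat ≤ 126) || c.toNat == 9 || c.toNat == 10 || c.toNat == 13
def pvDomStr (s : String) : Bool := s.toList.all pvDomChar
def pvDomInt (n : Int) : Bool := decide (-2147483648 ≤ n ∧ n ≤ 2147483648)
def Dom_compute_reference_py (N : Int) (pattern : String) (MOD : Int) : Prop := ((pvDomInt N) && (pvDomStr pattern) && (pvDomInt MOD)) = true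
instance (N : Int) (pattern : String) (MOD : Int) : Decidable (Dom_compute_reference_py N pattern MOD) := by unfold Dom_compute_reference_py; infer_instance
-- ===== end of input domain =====

-- B drops the absorbing matched state (an M×M matrix instead of (M+1)×(M+1)), builds the
-- automaton with a rolling border state instead of a prefix-function array, and powers the
-- matrix by recursive halving; objective: alternative (same asymptotics, smaller matrix).

-- ===== PORT A =====
-- `while j > 0 and c != pat[j]: j = pi[j-1]` — fueled recursion; fuel `j` suffices because
-- the prefix-function entries satisfy `pi[t] ≤ t` (proved below), so `j` strictly decreases.
-- All list indices read here are provably in range, so `getD` is exact.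
def kmpChain (pat : List Char) (pi : List Nat) (c : Char) : Nat → Nat → Nat
  | 0, j => j
  | fuel + 1, j =>
    if 0 < j ∧ c ≠ pat.getD j ' ' then kmpChain pat pi c fuel (pi.getD (j - 1) 0) else j

-- the `while …` loop followed by `if c == pat[j]: j += 1` (A repeats this shape twice)
def kmpStep (pat : List Char) (pi : List Nat) (c : Char) (j : Nat) : Nat :=
  let j' := kmpChain pat pi c j j
  if c = pat.getD j' ' ' then j' + 1 else j'

-- build_prefix: pi = [0]*m; j = 0; for i in range(1, m): …
def buildPrefixA (pat : List Char) : List Nat :=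
  let m := pat.length
  ((List.range' 1 (m - 1)).foldl
    (fun (st : List Nat × Nat) i =>
      let j := kmpStep pat st.1 (pat.getD i ' ') st.2
      (st.1.set i j, j))
    (List.replicate m 0, 0)).1

-- multiply_matrices (imperative triple loop with the `if aik:` skip)
def mulA (X Y : List (List Int)) (mod : Int) : List (List Int) :=
  let size := X.length
  (List.range size).foldl (fun C i =>
    (List.range size).foldl (fun C k =>
      let aik := (X.getD i []).getD k 0
      if aik ≠ 0 then
        (List.range size).foldl (fun C j =>
          C.set i ((C.getD i []).set j
            (PySem.Int.mod ((C.getD i []).getD j 0 + aik * (Y.getD k []).getD j 0) mod))) C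
      else C) C)
    (List.replicate size (List.replicate size (0 : Int)))

-- matrix_power: while e > 0: if e & 1: result = result*base; base = base*base; e >>= 1
def matPowLoopA (mod : Int) (result base : List (List Int)) (e : Int) : List (List Int) :=
  if h : 0 < e then
    matPowLoopA mod (if PySem.Int.band e 1 ≠ 0 then mulA result base mod else result)
      (mulA base base mod) (e >>> (1 : Nat))
  else result
termination_by e.toNat
decreasing_by
  have he : e >>> (1 : Nat) = e / 2 := by simp [Int.shiftRight_eq_div_pow]
  omega

def matPowA (matrix : List (List Int)) (exponent : Int) (mod : Int) : List (List Int) :=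
  let size := matrix.length
  matPowLoopA mod
    ((List.range size).map (fun i => (List.range size).map (fun j => if i = j then (1 : Int) else 0)))
    matrix exponent

def compute_reference_py (N : Int) (pattern : String) (MOD : Int) : Int :=
  let pat := pattern.toList
  let M := pat.length
  let pi := buildPrefixA pat
  let size := M + 1
  -- B = [[0]*size for _ in range(size)]; for state in range(M): for digit in "01": …
  let B1 := (List.range M).foldl (fun B state =>
      (['0', '1']).foldl (fun B digit =>
        let k := kmpStep pat pi digit state
        B.set state ((B.getD state []).set k ((B.getD state []).getD k 0 + 1))) B)
    (List.replicate size (List.replicate size (0 : Int)))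
  let Bf := B1.set M ((B1.getD M []).set M 2)     -- B[M][M] = 2
  let Bn := matPowA Bf N MOD
  PySem.Int.mod ((List.range M).foldl (fun acc j => acc + (Bn.getD 0 []).getD j 0) 0) MOD

-- ===== PORT B =====
-- one automaton row: {c: s+1 if c == pattern[s] else (aut[k][c] if s else 0) for c in alphabet}
def autRowB (pat : List Char) (alphabet : List Char) (aut : List (PySem.Dict Char Nat))
    (k s : Nat) : PySem.Dict Char Nat :=
  alphabet.foldl
    (fun d c => d.insert c
      (if c = pat.getD s ' ' then s + 1
       else if s ≠ 0 then (aut.getD k .empty).getD c 0 else 0))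
    .empty

-- the automaton build with its rolling border state k (indices provably in range: k ≤ s-1)
def autB (pat : List Char) (alphabet : List Char) : List (PySem.Dict Char Nat) × Nat :=
  (List.range pat.length).foldl
    (fun (st : List (PySem.Dict Char Nat) × Nat) s =>
      let aut := st.1 ++ [autRowB pat alphabet st.1 st.2 s]
      (aut, if s ≠ 0 then (aut.getD st.2 .empty).getD (pat.getD s ' ') 0 else st.2))
    ([], 0)

-- T = [[sum(1 for c in "01" if aut[s][c] == t) for t in range(M)] for s in range(M)]
def matTB (M : Nat) (aut : List (PySem.Dict Char Nat)) : List (List Int) :=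
  (List.range M).map (fun s => (List.range M).map (fun t =>
    ((['0', '1']).map (fun c => if (aut.getD s .empty).getD c 0 = t then (1 : Int) else 0)).sum))

def mulB (M : Nat) (MOD : Int) (X Y : List (List Int)) : List (List Int) :=
  (List.range M).map (fun i => (List.range M).map (fun j =>
    PySem.Int.mod (((List.range M).map
      (fun k => (X.getD i []).getD k 0 * (Y.getD k []).getD j 0)).sum) MOD))

def mpowB (M : Nat) (MOD : Int) (T : List (List Int)) (n : Int) : List (List Int) :=
  if h : n ≤ 0 then
    (List.range M).map (fun i => (List.range M).map (fun j => if i = j then (1 : Int) else 0))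
  else
    let H := mpowB M MOD T (PySem.Int.floordiv n 2)
    let H2 := mulB M MOD H H
    if PySem.Int.mod n 2 ≠ 0 then mulB M MOD H2 T else H2
termination_by n.toNat
decreasing_by
  have he : PySem.Int.floordiv n 2 = n / 2 := PySem.Int.floordiv_eq_ediv_of_pos (by omega)
  omega

def compute_reference_py_alt (N : Int) (pattern : String) (MOD : Int) : Int :=
  let pat := pattern.toList
  let M := pat.length
  if M = 0 then 0       -- every string contains the empty pattern
  else
    let alphabet := PySem.List.sorted (PySem.Set.ofList ('0' :: '1' :: pat)) (fun c => c) false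
    let aut := (autB pat alphabet).1
    let T := matTB M aut
    PySem.Int.mod ((mpowB M MOD T N).getD 0 []).sum MOD

-- ===== PRECONDITION & SPEC =====
-- Pre_ excludes exactly MOD = 0, on which Python A raises ZeroDivisionError.
def Pre_compute_reference_py (N : Int) (pattern : String) (MOD : Int) : Prop := MOD ≠ 0
instance (N : Int) (pattern : String) (MOD : Int) : Decidable (Pre_compute_reference_py N pattern MOD) := by unfold Pre_compute_reference_py; infer_instance
def pvWitness_compute_reference_py : Int × String × Int := (5, "01", 7)

def Spec_compute_reference_py (N : Int) (pattern : String) (MOD : Int) (out : Int) : Prop := out = compute_reference_py_alt N pattern MOD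
instance (N : Int) (pattern : String) (MOD : Int) (out : Int) : Decidable (Spec_compute_reference_py N pattern MOD out) := by unfold Spec_compute_reference_py; infer_instance

-- ===== CLAIM (what is proved, stated in full; the proofs are below) =====
def Claim_equal_compute_reference_py : Prop := ∀ (N : Int) (pattern : String) (MOD : Int), Dom_compute_reference_py N pattern MOD → Pre_compute_reference_py N pattern MOD → Spec_compute_reference_py N pattern MOD (compute_reference_py N pattern MOD)

-- ===== LEMMAS AND PROOFS =====

def PiBound (pi : List Nat) : Prop := ∀ t, pi.getD t 0 ≤ t

theorem kmpStep_eq (pat : List Char) (pi : List Nat) (c : Char) (j : Nat) :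
    kmpStep pat pi c j = if c = pat.getD (kmpChain pat pi c j j) ' '
      then kmpChain pat pi c j j + 1 else kmpChain pat pi c j j := rfl

theorem chain_le (pat : List Char) (pi : List Nat) (c : Char) (hpi : PiBound pi) :
    ∀ fuel j, kmpChain pat pi c fuel j ≤ j := by
  intro fuel
  induction fuel with
  | zero => intro j; simp [kmpChain]
  | succ f ih =>
    intro j
    rw [kmpChain]
    split
    · exact le_trans (ih _) (le_trans (hpi (j-1)) (by omega))
    · exact le_refl j

theorem chain_eq_self (pat : List Char) (pi : List Nat) (c : Char) (hpi : PiBound pi) :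
    ∀ j fuel, j ≤ fuel → kmpChain pat pi c fuel j = kmpChain pat pi c j j := by
  intro j
  induction j using Nat.strong_induction_on with
  | _ j ih =>
    intro fuel hf
    match j, fuel with
    | 0, 0 => rfl
    | 0, f+1 => simp [kmpChain]
    | jj+1, f+1 =>
      rw [kmpChain]
      conv_rhs => rw [kmpChain]
      split
      · have hb : pi.getD jj 0 ≤ jj := hpi jj
        simp only [Nat.add_sub_cancel]
        rw [ih (pi.getD jj 0) (by omega) f (by omega),
            ih (pi.getD jj 0) (by omega) jj (by omega)]
      · rfl

theorem chain_congr (pat : List Char) (pi1 pi2 : List Nat) (c : Char) (hpi : PiBound pi1) :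
    ∀ fuel j, (∀ t, t < j → pi1.getD t 0 = pi2.getD t 0) →
      kmpChain pat pi1 c fuel j = kmpChain pat pi2 c fuel j := by
  intro fuel
  induction fuel with
  | zero => intro j _; rfl
  | succ f ih =>
    intro j hag
    rw [kmpChain]; conv_rhs => rw [kmpChain]
    split
    · rw [← hag (j-1) (by rename_i hc; omega)]
      exact ih _ (fun t ht => hag t (by have := hpi (j-1); omega))
    · rfl

theorem step_le (pat : List Char) (pi : List Nat) (c : Char) (hpi : PiBound pi) (j : Nat) :
    kmpStep pat pi c j ≤ j + 1 := by
  rw [kmpStep_eq]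
  have := chain_le pat pi c hpi j j
  split <;> omega

theorem step_congr (pat : List Char) (pi1 pi2 : List Nat) (c : Char) (hpi : PiBound pi1)
    (j : Nat) (hag : ∀ t, t < j → pi1.getD t 0 = pi2.getD t 0) :
    kmpStep pat pi1 c j = kmpStep pat pi2 c j := by
  rw [kmpStep_eq, kmpStep_eq, chain_congr pat pi1 pi2 c hpi j j hag]

theorem step_match (pat : List Char) (pi : List Nat) (c : Char) (j : Nat)
    (h : c = pat.getD j ' ') : kmpStep pat pi c j = j + 1 := by
  have hch : kmpChain pat pi c j j = j := by
    match j with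
    | 0 => rfl
    | jj+1 =>
      rw [kmpChain, if_neg]
      intro ⟨_, hne⟩
      exact hne h
  rw [kmpStep_eq, hch, if_pos h]

theorem step_mismatch (pat : List Char) (pi : List Nat) (c : Char) (j : Nat) (hpi : PiBound pi)
    (hj : 0 < j) (h : c ≠ pat.getD j ' ') :
    kmpStep pat pi c j = kmpStep pat pi c (pi.getD (j-1) 0) := by
  match j, hj with
  | jj+1, _ =>
    have h1 : kmpChain pat pi c (jj+1) (jj+1) = kmpChain pat pi c jj (pi.getD jj 0) := by
      rw [kmpChain, if_pos ⟨by omega, h⟩]; simp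
    rw [kmpStep_eq, kmpStep_eq, h1,
      chain_eq_self pat pi c hpi _ jj (by have := hpi jj; omega)]
    simp

theorem step_zero (pat : List Char) (pi : List Nat) (c : Char) :
    kmpStep pat pi c 0 = if c = pat.getD 0 ' ' then 1 else 0 := rfl

-- build_prefix: pi = [0]*m; j = 0; for i in range(1, m): …
def PInv (pat : List Char) (i : Nat) (st : List Nat × Nat) : Prop :=
  st.1.length = pat.length ∧ PiBound st.1 ∧ st.1.getD 0 0 = 0 ∧
  (∀ t, i ≤ t → st.1.getD t 0 = 0) ∧
  (∀ t, 1 ≤ t → t < i → st.1.getD t 0 = kmpStep pat st.1 (pat.getD t ' ') (st.1.getD (t-1) 0)) ∧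
  st.2 = (if i ≤ 1 then 0 else st.1.getD (i-1) 0)

theorem PInv_init (pat : List Char) : PInv pat 1 (List.replicate pat.length 0, 0) :=
  ⟨by simp, fun t => by simp [List.getD], by simp [List.getD],
    fun t _ => by simp [List.getD], fun t h1 h2 => by omega, by simp⟩

theorem PInv_step (pat : List Char) (i : Nat) (st : List Nat × Nat)
    (hinv : PInv pat i st) (h1 : 1 ≤ i) (hm : i < pat.length) :
    PInv pat (i+1)
      (st.1.set i (kmpStep pat st.1 (pat.getD i ' ') st.2),
       kmpStep pat st.1 (pat.getD i ' ') st.2) := by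
  obtain ⟨hlen, hbd, hz0, hzero, hrec, hj⟩ := hinv
  set v := kmpStep pat st.1 (pat.getD i ' ') st.2 with hv
  have hjle : st.2 ≤ i - 1 := by
    rw [hj]; split
    · omega
    · exact hbd (i-1)
  have hvle : v ≤ i := by
    have := step_le pat st.1 (pat.getD i ' ') hbd st.2
    omega
  have hagree : ∀ t, t ≠ i → (st.1.set i v).getD t 0 = st.1.getD t 0 := by
    intro t ht; simp [List.getD, ht.symm]
  have hgi : (st.1.set i v).getD i 0 = v := by
    simp [List.getD, hlen, hm]
  refine ⟨by simp [hlen], ?_, ?_, ?_, ?_, ?_⟩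
  · intro t
    by_cases ht : t = i
    · rw [ht, hgi]; exact hvle
    · rw [hagree t ht]; exact hbd t
  · rw [hagree 0 (by omega)]; exact hz0
  · intro t ht
    rw [hagree t (by omega)]
    exact hzero t (by omega)
  · intro t ht1 ht2
    by_cases ht : t = i
    · rw [ht, hgi, hv]
      have harg : st.2 = (st.1.set i v).getD (i-1) 0 := by
        rw [hagree (i-1) (by omega), hj]
        split
        · rename_i hle
          have hi1 : i = 1 := by omega
          rw [hi1]; exact hz0.symm
        · rfl
      rw [← harg]
      exact step_congr pat st.1 (st.1.set i v) (pat.getD i ' ') hbd st.2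
        (fun u hu => (hagree u (by omega)).symm)
    · have ht' : t < i := by omega
      rw [hagree t ht, hrec t ht1 ht', hagree (t-1) (by omega)]
      exact step_congr pat st.1 (st.1.set i v) (pat.getD t ' ') hbd _
        (fun u hu => by
          have : st.1.getD (t-1) 0 ≤ t - 1 := hbd _
          exact (hagree u (by omega)).symm)
  · rw [if_neg (by omega)]
    simpa using hgi.symm

theorem buildPrefix_inv (pat : List Char) :
    ∀ k, k ≤ pat.length - 1 →
      PInv pat (k+1) ((List.range' 1 k).foldl
        (fun (st : List Nat × Nat) i =>
          let j := kmpStep pat st.1 (pat.getD i ' ') st.2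
          (st.1.set i j, j))
        (List.replicate pat.length 0, 0)) := by
  intro k
  induction k with
  | zero => intro _; exact PInv_init pat
  | succ k ih =>
    intro hk
    rw [List.range'_concat, List.foldl_append]
    simp only [List.foldl_cons, List.foldl_nil, Nat.one_mul]
    have hik : 1 + k = k + 1 := by omega
    rw [hik]
    exact PInv_step pat (k+1) _ (ih (by omega)) (by omega) (by omega)

theorem piA_spec (pat : List Char) :
    (buildPrefixA pat).length = pat.length ∧ PiBound (buildPrefixA pat) ∧
    (buildPrefixA pat).getD 0 0 = 0 ∧
    (∀ t, 1 ≤ t → t < pat.length →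
      (buildPrefixA pat).getD t 0
        = kmpStep pat (buildPrefixA pat) (pat.getD t ' ') ((buildPrefixA pat).getD (t-1) 0)) := by
  have h := buildPrefix_inv pat (pat.length - 1) (le_refl _)
  obtain ⟨hlen, hbd, hz0, hzero, hrec, -⟩ := h
  unfold buildPrefixA
  exact ⟨hlen, hbd, hz0, fun t h1 h2 => hrec t h1 (by omega)⟩

-- the canonical automaton transition (A's `kmpStep` at A's own prefix function)
def walkSpec (pat : List Char) (s : Nat) (c : Char) : Nat :=
  kmpStep pat (buildPrefixA pat) c s

-- number of digits in "01" that move live state s to state t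
def cnt (pat : List Char) (s t : Nat) : Int :=
  (if walkSpec pat s '0' = t then 1 else 0) + (if walkSpec pat s '1' = t then 1 else 0)

-- exact (un-modded) transition matrices of A (with the absorbing state) and B (without)
def EB (pat : List Char) : Matrix (Fin (pat.length + 1)) (Fin (pat.length + 1)) ℤ :=
  fun i j => if (i : Nat) = pat.length then (if (j : Nat) = pat.length then 2 else 0)
             else cnt pat i j

def ET (pat : List Char) : Matrix (Fin pat.length) (Fin pat.length) ℤ :=
  fun i j => cnt pat i j

theorem walk_le (pat : List Char) (s : Nat) (c : Char) : walkSpec pat s c ≤ s + 1 :=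
  step_le pat _ c (piA_spec pat).2.1 s

-- A's per-state double increment produces exactly the cnt row
def Minv (pat : List Char) (s : Nat) (B : List (List Int)) : Prop :=
  B.length = pat.length + 1 ∧ (∀ r ∈ B, r.length = pat.length + 1) ∧
  (∀ u, u < s → ∀ t, (B.getD u []).getD t 0 = cnt pat u t) ∧
  (∀ u, s ≤ u → B.getD u [] = if u ≤ pat.length then List.replicate (pat.length + 1) (0:Int) else [])


theorem getD_set_self {α : Type} {l : List α} {i : Nat} (v d : α) (h : i < l.length) :
    (l.set i v).getD i d = v := by
  simp [List.getD_eq_getElem?_getD, List.getElem?_set, h]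

theorem getD_set_ne {α : Type} {l : List α} {i t : Nat} (v d : α) (h : t ≠ i) :
    (l.set i v).getD t d = l.getD t d := by
  simp [List.getD_eq_getElem?_getD, List.getElem?_set, Ne.symm h]

theorem getD_replicate_zero (n t : Nat) : (List.replicate n (0:Int)).getD t 0 = 0 := by
  rcases Nat.lt_or_ge t n with h | h
  · simp [List.getD_replicate, h]
  · exact List.getD_eq_default _ _ (by simpa using h)

theorem matA_step (pat : List Char) (k : Nat) (B : List (List Int))
    (h : Minv pat k B) (hk : k < pat.length) :
    Minv pat (k+1) ((['0', '1']).foldl (fun B digit =>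
      let kk := kmpStep pat (buildPrefixA pat) digit k
      B.set k ((B.getD k []).set kk ((B.getD k []).getD kk 0 + 1))) B) := by
  obtain ⟨hlen, hrows, hdone, htodo⟩ := h
  simp only [List.foldl_cons, List.foldl_nil]
  have hr : B.getD k [] = List.replicate (pat.length + 1) (0:Int) := by
    have := htodo k (le_refl k)
    rwa [if_pos (by omega)] at this
  have hk0 : walkSpec pat k '0' ≤ pat.length := le_trans (walk_le pat k '0') (by omega)
  have hk1 : walkSpec pat k '1' ≤ pat.length := le_trans (walk_le pat k '1') (by omega)
  have hkb : k < B.length := by omega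
  set k0 := kmpStep pat (buildPrefixA pat) '0' k with hk0d
  set k1 := kmpStep pat (buildPrefixA pat) '1' k with hk1d
  have ek0 : k0 = walkSpec pat k '0' := rfl
  have ek1 : k1 = walkSpec pat k '1' := rfl
  set r1 := (B.getD k []).set k0 ((B.getD k []).getD k0 0 + 1) with hr1
  have hB1 : (B.set k r1).getD k [] = r1 := getD_set_self _ _ hkb
  rw [hB1]
  set r2 := r1.set k1 (r1.getD k1 0 + 1) with hr2
  have hrlen : (B.getD k []).length = pat.length + 1 := by rw [hr]; simp
  have hlr1 : r1.length = pat.length + 1 := by rw [hr1]; simpa using hrlen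
  have hlr2 : r2.length = pat.length + 1 := by rw [hr2]; simpa using hlr1
  have hr0 : ∀ t, (B.getD k []).getD t 0 = 0 := by
    intro t; rw [hr]; exact getD_replicate_zero _ t
  have hg1 : ∀ t, r1.getD t 0 = if k0 = t then 1 else 0 := by
    intro t
    by_cases hx : k0 = t
    · subst hx
      rw [hr1, getD_set_self _ _ (by omega), hr0 k0, if_pos rfl]
      norm_num
    · rw [hr1, getD_set_ne _ _ (Ne.symm hx), hr0 t, if_neg hx]
  have hg2 : ∀ t, r2.getD t 0 = cnt pat k t := by
    intro t
    unfold cnt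
    rw [← ek0, ← ek1]
    by_cases hx : k1 = t
    · subst hx
      rw [hr2, getD_set_self _ _ (by omega), hg1 k1, if_pos rfl]
    · rw [hr2, getD_set_ne _ _ (Ne.symm hx), hg1 t, if_neg hx]
      simp
  refine ⟨by simp [hlen], ?_, ?_, ?_⟩
  · intro r hrm
    rcases List.mem_or_eq_of_mem_set hrm with hrm' | rfl
    · rcases List.mem_or_eq_of_mem_set hrm' with hrm'' | rfl
      · exact hrows r hrm''
      · exact hlr1
    · exact hlr2
  · intro u hu t
    by_cases hx : u = k
    · subst hx
      rw [getD_set_self _ _ (by simpa using hkb)]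
      exact hg2 t
    · rw [getD_set_ne _ _ hx, getD_set_ne _ _ hx]
      exact hdone u (by omega) t
  · intro u hu
    rw [getD_set_ne _ _ (by omega), getD_set_ne _ _ (by omega)]
    exact htodo u (by omega)

theorem matA_inv (pat : List Char) :
    ∀ k, k ≤ pat.length →
      Minv pat k ((List.range k).foldl (fun B state =>
        (['0', '1']).foldl (fun B digit =>
          let kk := kmpStep pat (buildPrefixA pat) digit state
          B.set state ((B.getD state []).set kk ((B.getD state []).getD kk 0 + 1))) B)
        (List.replicate (pat.length + 1) (List.replicate (pat.length + 1) (0 : Int)))) := by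
  intro k
  induction k with
  | zero =>
    intro _
    simp only [List.range_zero, List.foldl_nil]
    refine ⟨by simp, fun r hr => by simp_all [List.eq_of_mem_replicate hr], by omega, ?_⟩
    intro u _
    by_cases hu : u ≤ pat.length
    · rw [if_pos hu]
      simp [List.getD, List.getElem?_replicate, Nat.lt_succ_of_le hu]
    · rw [if_neg hu]
      simp only [List.getD, List.getElem?_replicate]
      rw [if_neg (by omega)]
      rfl
  | succ k ih =>
    intro hk
    have ⟨hlen, hrows, hdone, htodo⟩ := ih (by omega)
    rw [List.range_succ, List.foldl_append]
    simp only [List.foldl_cons, List.foldl_nil]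
    exact matA_step pat k _ (ih (by omega)) (by omega)

def mfun {n : Nat} (f : Matrix (Fin n) (Fin n) ℤ) : Nat → Nat → Int :=
  fun i j => if h : i < n ∧ j < n then f ⟨i, h.1⟩ ⟨j, h.2⟩ else 0

def CF (m : Int) (n : Nat) (X : List (List Int)) (F : Nat → Nat → Int) : Prop :=
  X.length = n ∧ (∀ r ∈ X, r.length = n) ∧
    ∀ i j, i < n → j < n → ((X.getD i []).getD j 0) ≡ F i j [ZMOD m]

theorem pymod_congr {m a b : Int} (h : a ≡ b [ZMOD m]) :
    PySem.Int.mod a m = PySem.Int.mod b m := by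
  show a.fmod m = b.fmod m
  rw [Int.fmod_eq_fmod_iff_fmod_sub_eq_zero]
  exact Int.fmod_eq_zero_of_dvd (Int.ModEq.dvd h.symm)

theorem pymod_modEq (a m : Int) : PySem.Int.mod a m ≡ a [ZMOD m] := by
  show a.fmod m ≡ a [ZMOD m]
  have h := Int.fmod_add_mul_fdiv a m
  exact Int.ModEq.symm (Int.modEq_iff_dvd.mpr ⟨-(a.fdiv m), by linarith⟩)

theorem sum_map_range_eq (n : Nat) (f : Nat → Int) :
    ((List.range n).map f).sum = ∑ k ∈ Finset.range n, f k := by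
  induction n with
  | zero => rfl
  | succ n ih => rw [List.range_succ, List.map_append, List.sum_append,
      Finset.sum_range_succ, ih]; simp

-- the inner `for j in range(size)` loop of A's multiply
theorem innerJ (m aik : Int) (yrow : List Int) (i : Nat) :
    ∀ (nJ : Nat) (C : List (List Int)), i < C.length → nJ ≤ (C.getD i []).length →
      (((List.range nJ).foldl (fun C j => C.set i ((C.getD i []).set j
          (PySem.Int.mod ((C.getD i []).getD j 0 + aik * yrow.getD j 0) m))) C).length = C.length) ∧
      (∀ u, u ≠ i → ((List.range nJ).foldl (fun C j => C.set i ((C.getD i []).set j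
          (PySem.Int.mod ((C.getD i []).getD j 0 + aik * yrow.getD j 0) m))) C).getD u [] = C.getD u []) ∧
      ((((List.range nJ).foldl (fun C j => C.set i ((C.getD i []).set j
          (PySem.Int.mod ((C.getD i []).getD j 0 + aik * yrow.getD j 0) m))) C).getD i []).length = (C.getD i []).length) ∧
      (∀ j, j < nJ → (((List.range nJ).foldl (fun C j => C.set i ((C.getD i []).set j
          (PySem.Int.mod ((C.getD i []).getD j 0 + aik * yrow.getD j 0) m))) C).getD i []).getD j 0
          = PySem.Int.mod ((C.getD i []).getD j 0 + aik * yrow.getD j 0) m) ∧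
      (∀ j, nJ ≤ j → (((List.range nJ).foldl (fun C j => C.set i ((C.getD i []).set j
          (PySem.Int.mod ((C.getD i []).getD j 0 + aik * yrow.getD j 0) m))) C).getD i []).getD j 0
          = (C.getD i []).getD j 0) := by
  intro nJ
  induction nJ with
  | zero =>
    intro C hi _
    exact ⟨rfl, fun u _ => rfl, rfl, fun j hj => by omega, fun j _ => rfl⟩
  | succ nJ ih =>
    intro C hi hlen
    obtain ⟨dl, dto, drl, ddone, drest⟩ := ih C hi (by omega)
    rw [List.range_succ, List.foldl_append]
    simp only [List.foldl_cons, List.foldl_nil]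
    set D := (List.range nJ).foldl (fun C j => C.set i ((C.getD i []).set j
        (PySem.Int.mod ((C.getD i []).getD j 0 + aik * yrow.getD j 0) m))) C with hD
    have hiD : i < D.length := by omega
    have hrowD : (D.getD i []).length = (C.getD i []).length := drl
    set v := PySem.Int.mod ((D.getD i []).getD nJ 0 + aik * yrow.getD nJ 0) m with hv
    have hsets : (D.set i ((D.getD i []).set nJ v)).getD i [] = (D.getD i []).set nJ v :=
      getD_set_self _ _ hiD
    refine ⟨by simpa using dl, ?_, ?_, ?_, ?_⟩
    · intro u hu
      rw [getD_set_ne _ _ hu]; exact dto u hu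
    · rw [hsets]; simpa using hrowD
    · intro j hj
      rw [hsets]
      by_cases hx : j = nJ
      · rw [hx, getD_set_self _ _ (by omega), hv, drest nJ (le_refl _)]
      · rw [getD_set_ne _ _ hx]
        exact ddone j (by omega)
    · intro j hj
      rw [hsets, getD_set_ne _ _ (by omega)]
      exact drest j (by omega)

-- middle `for k in range(size)` loop: row i accumulates partial sums mod m
theorem midK (m : Int) (n : Nat) (X Y : List (List Int)) (F G : Nat → Nat → Int)
    (hX : ∀ i k, i < n → k < n → ((X.getD i []).getD k 0) ≡ F i k [ZMOD m])
    (hY : ∀ k j, k < n → j < n → ((Y.getD k []).getD j 0) ≡ G k j [ZMOD m])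
    (i : Nat) (hi : i < n) :
    ∀ (nK : Nat), nK ≤ n → ∀ (C : List (List Int)), C.length = n → (C.getD i []).length = n →
      (∀ j, j < n → (C.getD i []).getD j 0 ≡ 0 [ZMOD m]) →
      (((List.range nK).foldl (fun C k =>
          if (X.getD i []).getD k 0 ≠ 0 then
            (List.range n).foldl (fun C j => C.set i ((C.getD i []).set j
              (PySem.Int.mod ((C.getD i []).getD j 0 + (X.getD i []).getD k 0 * (Y.getD k []).getD j 0) m))) C
          else C) C).length = n) ∧
      (∀ u, u ≠ i → ((List.range nK).foldl (fun C k =>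
          if (X.getD i []).getD k 0 ≠ 0 then
            (List.range n).foldl (fun C j => C.set i ((C.getD i []).set j
              (PySem.Int.mod ((C.getD i []).getD j 0 + (X.getD i []).getD k 0 * (Y.getD k []).getD j 0) m))) C
          else C) C).getD u [] = C.getD u []) ∧
      ((((List.range nK).foldl (fun C k =>
          if (X.getD i []).getD k 0 ≠ 0 then
            (List.range n).foldl (fun C j => C.set i ((C.getD i []).set j
              (PySem.Int.mod ((C.getD i []).getD j 0 + (X.getD i []).getD k 0 * (Y.getD k []).getD j 0) m))) C
          else C) C).getD i []).length = n) ∧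
      (∀ j, j < n → (((List.range nK).foldl (fun C k =>
          if (X.getD i []).getD k 0 ≠ 0 then
            (List.range n).foldl (fun C j => C.set i ((C.getD i []).set j
              (PySem.Int.mod ((C.getD i []).getD j 0 + (X.getD i []).getD k 0 * (Y.getD k []).getD j 0) m))) C
          else C) C).getD i []).getD j 0 ≡ ∑ k ∈ Finset.range nK, F i k * G k j [ZMOD m]) := by
  intro nK
  induction nK with
  | zero =>
    intro _ C hC hrow hz
    refine ⟨hC, fun u _ => rfl, hrow, ?_⟩
    intro j hj
    simpa using hz j hj
  | succ nK ih =>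
    intro hnK C hC hrow hz
    obtain ⟨dl, dto, drl, dcong⟩ := ih (by omega) C hC hrow hz
    rw [List.range_succ, List.foldl_append]
    simp only [List.foldl_cons, List.foldl_nil]
    set D := (List.range nK).foldl (fun C k =>
          if (X.getD i []).getD k 0 ≠ 0 then
            (List.range n).foldl (fun C j => C.set i ((C.getD i []).set j
              (PySem.Int.mod ((C.getD i []).getD j 0 + (X.getD i []).getD k 0 * (Y.getD k []).getD j 0) m))) C
          else C) C with hD
    by_cases ha : (X.getD i []).getD nK 0 ≠ 0
    · rw [if_pos ha]
      obtain ⟨el, eto, erl, edone, erest⟩ :=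
        innerJ m ((X.getD i []).getD nK 0) (Y.getD nK []) i n D (by omega) (by omega)
      refine ⟨by omega, ?_, by omega, ?_⟩
      · intro u hu
        rw [eto u hu]; exact dto u hu
      · intro j hj
        rw [edone j hj, Finset.sum_range_succ]
        calc PySem.Int.mod ((D.getD i []).getD j 0 + (X.getD i []).getD nK 0 * (Y.getD nK []).getD j 0) m
            ≡ (D.getD i []).getD j 0 + (X.getD i []).getD nK 0 * (Y.getD nK []).getD j 0 [ZMOD m] :=
              pymod_modEq _ m
          _ ≡ (∑ k ∈ Finset.range nK, F i k * G k j) + F i nK * G nK j [ZMOD m] :=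
              Int.ModEq.add (dcong j hj) (Int.ModEq.mul (hX i nK hi (by omega)) (hY nK j (by omega) hj))
    · rw [if_neg ha]
      refine ⟨dl, dto, drl, ?_⟩
      intro j hj
      rw [Finset.sum_range_succ]
      have hzero : F i nK ≡ 0 [ZMOD m] := by
        have hx := hX i nK hi (by omega)
        have ha' : (X.getD i []).getD nK 0 = 0 := by simpa using ha
        rw [ha'] at hx
        exact hx.symm
      calc (D.getD i []).getD j 0
          ≡ ∑ k ∈ Finset.range nK, F i k * G k j [ZMOD m] := dcong j hj
        _ ≡ (∑ k ∈ Finset.range nK, F i k * G k j) + F i nK * G nK j [ZMOD m] := by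
            have : F i nK * G nK j ≡ 0 * G nK j [ZMOD m] := Int.ModEq.mul hzero (Int.ModEq.refl _)
            simpa using (Int.ModEq.add (Int.ModEq.refl (∑ k ∈ Finset.range nK, F i k * G k j)) this).symm

theorem getD_eq_getElem' {α : Type} (l : List α) (d : α) (u : Nat) (h : u < l.length) :
    l.getD u d = l[u] := by
  rw [List.getD_eq_getElem?_getD, List.getElem?_eq_getElem h]; rfl

theorem mem_of_forall_getD {α : Type} (l : List α) (d : α) (P : α → Prop)
    (h : ∀ u, u < l.length → P (l.getD u d)) : ∀ r ∈ l, P r := by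
  intro r hr
  obtain ⟨u, hu, rfl⟩ := List.mem_iff_getElem.mp hr
  rw [← getD_eq_getElem' l d u hu]
  exact h u hu

-- the outer `for i in range(size)` loop of A's multiply, cut off after nI rows
def mulCore (m : Int) (n : Nat) (X Y : List (List Int)) (nI : Nat) : List (List Int) :=
  (List.range nI).foldl (fun C i =>
    (List.range n).foldl (fun C k =>
      if (X.getD i []).getD k 0 ≠ 0 then
        (List.range n).foldl (fun C j => C.set i ((C.getD i []).set j
          (PySem.Int.mod ((C.getD i []).getD j 0 + (X.getD i []).getD k 0 * (Y.getD k []).getD j 0) m))) C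
      else C) C)
    (List.replicate n (List.replicate n (0:Int)))

theorem outerI (m : Int) (n : Nat) (X Y : List (List Int)) (F G : Nat → Nat → Int)
    (hX : ∀ i k, i < n → k < n → ((X.getD i []).getD k 0) ≡ F i k [ZMOD m])
    (hY : ∀ k j, k < n → j < n → ((Y.getD k []).getD j 0) ≡ G k j [ZMOD m]) :
    ∀ (nI : Nat), nI ≤ n →
      ((mulCore m n X Y nI).length = n) ∧
      (∀ u, u < nI → (((mulCore m n X Y nI).getD u []).length = n ∧
        ∀ j, j < n → ((mulCore m n X Y nI).getD u []).getD j 0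
          ≡ ∑ k ∈ Finset.range n, F u k * G k j [ZMOD m])) ∧
      (∀ u, nI ≤ u → (mulCore m n X Y nI).getD u []
          = if u < n then List.replicate n 0 else []) := by
  intro nI
  induction nI with
  | zero =>
    refine fun _ => ⟨by simp [mulCore], fun u hu => by omega, fun u hu => ?_⟩
    rcases Nat.lt_or_ge u n with h | h
    · rw [if_pos h]
      simp only [mulCore, List.foldl_nil, List.range_zero]
      exact (getD_eq_getElem' _ _ u (by simpa using h)).trans (by simp)
    · rw [if_neg (by omega)]
      simp only [mulCore, List.foldl_nil, List.range_zero]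
      exact List.getD_eq_default _ _ (by simpa using h)
  | succ nI ih =>
    intro hnI
    obtain ⟨dl, ddone, dtodo⟩ := ih (by omega)
    have hstep : mulCore m n X Y (nI+1) =
        (List.range n).foldl (fun C k =>
          if (X.getD nI []).getD k 0 ≠ 0 then
            (List.range n).foldl (fun C j => C.set nI ((C.getD nI []).set j
              (PySem.Int.mod ((C.getD nI []).getD j 0 + (X.getD nI []).getD k 0 * (Y.getD k []).getD j 0) m))) C
          else C) (mulCore m n X Y nI) := by
      unfold mulCore
      rw [List.range_succ, List.foldl_append]
      simp only [List.foldl_cons, List.foldl_nil]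
    rw [hstep]
    have hrownI : (mulCore m n X Y nI).getD nI [] = List.replicate n 0 := by
      have := dtodo nI (le_refl _)
      rwa [if_pos (by omega)] at this
    obtain ⟨el, eto, erl, econg⟩ := midK m n X Y F G hX hY nI (by omega) n (le_refl n)
      (mulCore m n X Y nI) dl
      (by rw [hrownI]; simp)
      (by intro j hj; rw [hrownI, getD_replicate_zero])
    refine ⟨el, ?_, ?_⟩
    · intro u hu
      by_cases hx : u = nI
      · subst hx
        exact ⟨erl, fun j hj => econg j hj⟩
      · rw [eto u hx]
        exact ddone u (by omega)
    · intro u hu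
      rw [eto u (by omega)]
      exact dtodo u (by omega)

theorem mfun_mul_point {n : Nat} (R Q : Matrix (Fin n) (Fin n) ℤ) (i j : Nat)
    (hi : i < n) (hj : j < n) :
    ∑ k ∈ Finset.range n, mfun R i k * mfun Q k j = mfun (R * Q) i j := by
  rw [← Fin.sum_univ_eq_sum_range (fun k => mfun R i k * mfun Q k j) n]
  unfold mfun
  rw [dif_pos ⟨hi, hj⟩, Matrix.mul_apply]
  apply Finset.sum_congr rfl
  intro k _
  rw [dif_pos ⟨hi, k.isLt⟩, dif_pos ⟨k.isLt, hj⟩]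

theorem mulA_CF {m : Int} {n : Nat} {X Y : List (List Int)}
    {R Q : Matrix (Fin n) (Fin n) ℤ}
    (hX : CF m n X (mfun R)) (hY : CF m n Y (mfun Q)) :
    CF m n (mulA X Y m) (mfun (R * Q)) := by
  obtain ⟨hXl, hXr, hXe⟩ := hX
  obtain ⟨hYl, hYr, hYe⟩ := hY
  obtain ⟨el, edone, -⟩ := outerI m n X Y (mfun R) (mfun Q) hXe hYe n (le_refl n)
  have hmul : mulA X Y m = mulCore m n X Y n := by
    unfold mulA mulCore
    rw [hXl]
  rw [hmul]
  refine ⟨el, ?_, ?_⟩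
  · exact mem_of_forall_getD _ [] _ (fun u hu => (edone u (by omega)).1)
  · intro i j hi hj
    rw [← mfun_mul_point R Q i j hi hj]
    exact (edone i hi).2 j hj

theorem powStepOdd {α : Type} [Monoid α] (R Q : α) (t : Nat) :
    (R * Q) * (Q * Q) ^ t = R * Q ^ (2 * t + 1) := by
  rw [← pow_two Q, ← pow_mul Q 2 t, mul_assoc, ← pow_succ' Q (2 * t)]

theorem powStepEven {α : Type} [Monoid α] (R Q : α) (t : Nat) :
    R * (Q * Q) ^ t = R * Q ^ (2 * t) := by
  rw [← pow_two Q, ← pow_mul Q 2 t]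

theorem idL_CF (m : Int) (n : Nat) :
    CF m n ((List.range n).map (fun i => (List.range n).map (fun j => if i = j then (1:Int) else 0)))
      (mfun (1 : Matrix (Fin n) (Fin n) ℤ)) := by
  refine ⟨by simp, ?_, ?_⟩
  · intro r hr
    obtain ⟨i, -, rfl⟩ := List.mem_map.mp hr
    simp
  · intro i j hi hj
    rw [PySem.List.getD_map_range _ _ _ _ hi, PySem.List.getD_map_range _ _ _ _ hj]
    unfold mfun
    rw [dif_pos ⟨hi, hj⟩, Matrix.one_apply]
    by_cases hx : i = j
    · subst hx; simp
    · rw [if_neg hx, if_neg (by simp [Fin.mk.injEq, hx])]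

theorem matPowLoopA_CF (m : Int) (n : Nat) :
    ∀ (kf : Nat) (e : Int) (res base : List (List Int)) (R Q : Matrix (Fin n) (Fin n) ℤ),
      e.toNat ≤ kf → CF m n res (mfun R) → CF m n base (mfun Q) →
      CF m n (matPowLoopA m res base e) (mfun (R * Q ^ e.toNat)) := by
  intro kf
  induction kf with
  | zero =>
    intro e res base R Q hk hres hbase
    rw [matPowLoopA, dif_neg (by omega)]
    rwa [show e.toNat = 0 by omega, pow_zero, mul_one]
  | succ kf ih =>
    intro e res base R Q hk hres hbase
    rw [matPowLoopA]
    by_cases hpos : 0 < e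
    · rw [dif_pos hpos]
      have he2 : e >>> (1:Nat) = e / 2 := by simp [Int.shiftRight_eq_div_pow]
      have hband : PySem.Int.band e 1 = e % 2 := by
        rw [PySem.Int.band_one e, PySem.Int.mod_eq_emod_of_pos (by omega)]
      have htn : (e >>> (1:Nat)).toNat ≤ kf := by rw [he2]; omega
      by_cases hb : PySem.Int.band e 1 ≠ 0
      · rw [if_pos hb]
        have hodd : e % 2 = 1 := by rw [hband] at hb; omega
        have h2 := ih (e >>> (1:Nat)) (mulA res base m) (mulA base base m) (R * Q) (Q * Q)
          htn (mulA_CF hres hbase) (mulA_CF hbase hbase)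
        have heq : (R * Q) * (Q * Q) ^ (e >>> (1:Nat)).toNat = R * Q ^ e.toNat := by
          rw [powStepOdd, he2, show 2 * (e / 2).toNat + 1 = e.toNat by omega]
        rwa [heq] at h2
      · rw [if_neg hb]
        have heven : e % 2 = 0 := by rw [hband] at hb; omega
        have h2 := ih (e >>> (1:Nat)) res (mulA base base m) R (Q * Q)
          htn hres (mulA_CF hbase hbase)
        have heq : R * (Q * Q) ^ (e >>> (1:Nat)).toNat = R * Q ^ e.toNat := by
          rw [powStepEven, he2, show 2 * (e / 2).toNat = e.toNat by omega]
        rwa [heq] at h2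
    · rw [dif_neg hpos]
      rwa [show e.toNat = 0 by omega, pow_zero, mul_one]

theorem matPowA_CF {m : Int} {n : Nat} {X : List (List Int)} {Q : Matrix (Fin n) (Fin n) ℤ}
    (hX : CF m n X (mfun Q)) (e : Int) :
    CF m n (matPowA X e m) (mfun (Q ^ e.toNat)) := by
  have h := matPowLoopA_CF m n e.toNat e
    ((List.range n).map (fun i => (List.range n).map (fun j => if i = j then (1:Int) else 0)))
    X 1 Q (le_refl _) (idL_CF m n) hX
  have hdef : matPowA X e m = matPowLoopA m
      ((List.range n).map (fun i => (List.range n).map (fun j => if i = j then (1:Int) else 0)))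
      X e := by
    unfold matPowA
    rw [hX.1]
  rw [hdef]
  rwa [one_mul] at h

theorem mulB_CF {m : Int} {n : Nat} {X Y : List (List Int)}
    {R Q : Matrix (Fin n) (Fin n) ℤ}
    (hX : CF m n X (mfun R)) (hY : CF m n Y (mfun Q)) :
    CF m n (mulB n m X Y) (mfun (R * Q)) := by
  refine ⟨by simp [mulB], ?_, ?_⟩
  · intro r hr
    obtain ⟨i, -, rfl⟩ := List.mem_map.mp hr
    simp
  · intro i j hi hj
    unfold mulB
    rw [PySem.List.getD_map_range _ _ _ _ hi, PySem.List.getD_map_range _ _ _ _ hj,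
      ← mfun_mul_point R Q i j hi hj]
    have h1 : (((List.range n).map
        (fun k => (X.getD i []).getD k 0 * (Y.getD k []).getD j 0)).sum)
        = ∑ k ∈ Finset.range n, (X.getD i []).getD k 0 * (Y.getD k []).getD j 0 :=
      sum_map_range_eq n _
    calc PySem.Int.mod (((List.range n).map
            (fun k => (X.getD i []).getD k 0 * (Y.getD k []).getD j 0)).sum) m
        ≡ ((List.range n).map
            (fun k => (X.getD i []).getD k 0 * (Y.getD k []).getD j 0)).sum [ZMOD m] :=
          pymod_modEq _ m
      _ ≡ ∑ k ∈ Finset.range n, mfun R i k * mfun Q k j [ZMOD m] := by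
          rw [h1]
          exact Int.ModEq.sum (fun k hk => Int.ModEq.mul
            (hX.2.2 i k hi (Finset.mem_range.mp hk))
            (hY.2.2 k j (Finset.mem_range.mp hk) hj))

theorem mpowB_CF (m : Int) (M : Nat) (T : List (List Int)) (Q : Matrix (Fin M) (Fin M) ℤ)
    (hT : CF m M T (mfun Q)) :
    ∀ (kf : Nat) (nE : Int), nE.toNat ≤ kf →
      CF m M (mpowB M m T nE) (mfun (Q ^ nE.toNat)) := by
  intro kf
  induction kf with
  | zero =>
    intro nE hk
    rw [mpowB, dif_pos (by omega), show nE.toNat = 0 by omega, pow_zero]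
    exact idL_CF m M
  | succ kf ih =>
    intro nE hk
    rw [mpowB]
    by_cases hneg : nE ≤ 0
    · rw [dif_pos hneg, show nE.toNat = 0 by omega, pow_zero]
      exact idL_CF m M
    · rw [dif_neg hneg]
      have hfd : PySem.Int.floordiv nE 2 = nE / 2 := PySem.Int.floordiv_eq_ediv_of_pos (by omega)
      have ht : (PySem.Int.floordiv nE 2).toNat ≤ kf := by rw [hfd]; omega
      have hH := ih _ ht
      have hH2 := mulB_CF hH hH
      by_cases hb : PySem.Int.mod nE 2 ≠ 0
      · rw [if_pos hb]
        have hodd : nE % 2 = 1 := by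
          rw [PySem.Int.mod_eq_emod_of_pos (by omega)] at hb; omega
        have h3 := mulB_CF hH2 hT
        have heq : Q ^ (PySem.Int.floordiv nE 2).toNat * Q ^ (PySem.Int.floordiv nE 2).toNat * Q
            = Q ^ nE.toNat := by
          rw [← pow_add, ← pow_succ, hfd, show (nE/2).toNat + (nE/2).toNat + 1 = nE.toNat by omega]
        rwa [heq] at h3
      · rw [if_neg hb]
        have heven : nE % 2 = 0 := by
          rw [PySem.Int.mod_eq_emod_of_pos (by omega)] at hb
          omega
        have heq : Q ^ (PySem.Int.floordiv nE 2).toNat * Q ^ (PySem.Int.floordiv nE 2).toNat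
            = Q ^ nE.toNat := by
          rw [← pow_add, hfd, show (nE/2).toNat + (nE/2).toNat = nE.toNat by omega]
        rwa [heq] at hH2

theorem EB_block (pat : List Char) : ∀ (e : Nat) (i j : Fin pat.length),
    (EB pat ^ e) i.castSucc j.castSucc = (ET pat ^ e) i j := by
  intro e
  induction e with
  | zero =>
    intro i j
    rw [pow_zero, pow_zero, Matrix.one_apply, Matrix.one_apply]
    by_cases hx : i = j
    · subst hx; simp
    · rw [if_neg (by simpa [Fin.castSucc_inj] using hx), if_neg hx]
  | succ e ih =>
    intro i j
    rw [pow_succ, pow_succ, Matrix.mul_apply, Matrix.mul_apply, Fin.sum_univ_castSucc]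
    have hlast : (EB pat) (Fin.last pat.length) j.castSucc = 0 := by
      unfold EB
      rw [if_pos (Fin.val_last pat.length), if_neg (by have := j.isLt; simp [Fin.val_castSucc]; omega)]
    rw [hlast, mul_zero, add_zero]
    apply Finset.sum_congr rfl
    intro k _
    rw [ih i k]
    congr 1
    show EB pat k.castSucc j.castSucc = ET pat k j
    unfold EB ET
    rw [if_neg (by simp [Fin.coe_castSucc]; omega)]
    simp [Fin.coe_castSucc]

theorem listSum_congr (m : Int) : ∀ (l : List Int) (F : Nat → Int),
    (∀ j, j < l.length → l.getD j 0 ≡ F j [ZMOD m]) →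
    l.sum ≡ ∑ j ∈ Finset.range l.length, F j [ZMOD m] := by
  intro l
  induction l with
  | nil => intro F _; simp
  | cons x t ih =>
    intro F h
    rw [List.sum_cons, List.length_cons, Finset.sum_range_succ', add_comm x t.sum]
    exact Int.ModEq.add
      (ih (fun j => F (j+1)) (fun j hj => h (j+1) (by simpa using hj)))
      (h 0 (by simp))

-- dict comprehension over distinct-irrelevant keys: last write is g c anyway
theorem dict_build_getD (g : Char → Nat) :
    ∀ (xs : List Char) (d : PySem.Dict Char Nat) (c : Char),
      ((xs.foldl (fun d c => d.insert c (g c)) d).getD c 0)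
        = if c ∈ xs then g c else d.getD c 0 := by
  intro xs
  induction xs with
  | nil => intro d c; simp
  | cons x rest ih =>
    intro d c
    rw [List.foldl_cons, ih]
    by_cases hc : c ∈ rest
    · rw [if_pos hc, if_pos (by simp [hc])]
    · rw [if_neg hc]
      by_cases hx : c = x
      · rw [if_pos (by simp [hx]), PySem.Dict.getD_insert, if_pos hx, hx]
      · rw [if_neg (by simp [hx, hc]), PySem.Dict.getD_insert, if_neg hx]

def AInv (pat alphabet : List Char) (s : Nat) (st : List (PySem.Dict Char Nat) × Nat) : Prop :=
  st.1.length = s ∧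
  (∀ u, u < s → ∀ c, c ∈ alphabet → (st.1.getD u .empty).getD c 0 = walkSpec pat u c) ∧
  st.2 = (if s = 0 then 0 else (buildPrefixA pat).getD (s-1) 0)

theorem autB_inv (pat alphabet : List Char)
    (hpat : ∀ u, u < pat.length → pat.getD u ' ' ∈ alphabet) :
    ∀ s, s ≤ pat.length →
      AInv pat alphabet s ((List.range s).foldl
        (fun (st : List (PySem.Dict Char Nat) × Nat) s =>
          let aut := st.1 ++ [autRowB pat alphabet st.1 st.2 s]
          (aut, if s ≠ 0 then (aut.getD st.2 .empty).getD (pat.getD s ' ') 0 else st.2))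
        ([], 0)) := by
  obtain ⟨hplen, hpbd, hpz, hprec⟩ := piA_spec pat
  intro s
  induction s with
  | zero => intro _; exact ⟨rfl, fun u hu => by omega, rfl⟩
  | succ s ih =>
    intro hs
    obtain ⟨hl, hdone, hk⟩ := ih (by omega)
    rw [List.range_succ, List.foldl_append]
    simp only [List.foldl_cons, List.foldl_nil]
    set st := (List.range s).foldl
        (fun (st : List (PySem.Dict Char Nat) × Nat) s =>
          let aut := st.1 ++ [autRowB pat alphabet st.1 st.2 s]
          (aut, if s ≠ 0 then (aut.getD st.2 .empty).getD (pat.getD s ' ') 0 else st.2))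
        ([], 0) with hst
    have hkbd : s ≠ 0 → st.2 < s := by
      intro hs0
      rw [hk, if_neg hs0]
      have := hpbd (s-1)
      omega
    set row := autRowB pat alphabet st.1 st.2 s with hrow
    have hrowval : ∀ c, c ∈ alphabet → row.getD c 0 = walkSpec pat s c := by
      intro c hc
      rw [hrow]
      unfold autRowB
      rw [dict_build_getD _ alphabet _ c, if_pos hc]
      by_cases hmatch : c = pat.getD s ' '
      · rw [if_pos hmatch]
        exact (step_match pat _ c s hmatch).symm
      · rw [if_neg hmatch]
        by_cases hs0 : s = 0
        · subst hs0
          rw [if_neg (by simp)]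
          unfold walkSpec
          rw [step_zero, if_neg hmatch]
        · rw [if_pos hs0]
          have hk' : st.2 = (buildPrefixA pat).getD (s-1) 0 := by rw [hk, if_neg hs0]
          rw [hdone st.2 (hkbd hs0) c hc, hk']
          unfold walkSpec
          rw [step_mismatch pat _ c s hpbd (by omega) hmatch]
    have hgetrow : (st.1 ++ [row]).getD s .empty = row := by
      rw [List.getD_append_right _ _ _ _ (by omega)]
      simp [hl]
    refine ⟨by simp [hl], ?_, ?_⟩
    · intro u hu c hc
      by_cases hx : u = s
      · subst hx
        rw [hgetrow]
        exact hrowval c hc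
      · rw [List.getD_append _ _ _ _ (by omega)]
        exact hdone u (by omega) c hc
    · by_cases hs0 : s = 0
      · subst hs0
        rw [if_neg (by simp), if_neg (by omega), hk, if_pos rfl]
        simpa using hpz.symm
      · rw [if_pos hs0, if_neg (by omega)]
        have hk' : st.2 = (buildPrefixA pat).getD (s-1) 0 := by rw [hk, if_neg hs0]
        rw [List.getD_append _ _ _ _ (by omega : st.2 < st.1.length),
          hdone st.2 (hkbd hs0) _ (hpat s (by omega)), hk']
        have := hprec s (by omega) (by omega)
        simp only [Nat.add_sub_cancel]
        exact this.symm

theorem matTB_CF (m : Int) (pat alphabet : List Char)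
    (hpat : ∀ u, u < pat.length → pat.getD u ' ' ∈ alphabet)
    (h0 : '0' ∈ alphabet) (h1 : '1' ∈ alphabet) :
    CF m pat.length
      (matTB pat.length ((List.range pat.length).foldl
        (fun (st : List (PySem.Dict Char Nat) × Nat) s =>
          let aut := st.1 ++ [autRowB pat alphabet st.1 st.2 s]
          (aut, if s ≠ 0 then (aut.getD st.2 .empty).getD (pat.getD s ' ') 0 else st.2))
        ([], 0)).1)
      (mfun (ET pat)) := by
  obtain ⟨hl, hdone, -⟩ := autB_inv pat alphabet hpat pat.length (le_refl _)
  refine ⟨by simp [matTB], ?_, ?_⟩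
  · intro r hr
    obtain ⟨i, -, rfl⟩ := List.mem_map.mp hr
    simp
  · intro i j hi hj
    unfold matTB
    rw [PySem.List.getD_map_range _ _ _ _ hi, PySem.List.getD_map_range _ _ _ _ hj]
    simp only [List.map_cons, List.map_nil, List.sum_cons, List.sum_nil, add_zero]
    rw [hdone i hi '0' h0, hdone i hi '1' h1]
    have : mfun (ET pat) i j = cnt pat i j := by
      unfold mfun ET
      rw [dif_pos ⟨hi, hj⟩]
    rw [this]
    unfold cnt
    rfl

theorem matA_CF (m : Int) (pat : List Char) (B1 : List (List Int))
    (hB1 : Minv pat pat.length B1) :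
    CF m (pat.length + 1)
      (B1.set pat.length ((B1.getD pat.length []).set pat.length 2)) (mfun (EB pat)) := by
  obtain ⟨hlen, hrows, hdone, htodo⟩ := hB1
  have hrowM : B1.getD pat.length [] = List.replicate (pat.length + 1) 0 := by
    have := htodo pat.length (le_refl _)
    rwa [if_pos (le_refl _)] at this
  have hrowlen : ((B1.getD pat.length []).set pat.length 2).length = pat.length + 1 := by
    rw [hrowM]; simp
  refine ⟨by simp [hlen], ?_, ?_⟩
  · intro r hr
    rcases List.mem_or_eq_of_mem_set hr with hr' | rfl
    · exact hrows r hr'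
    · exact hrowlen
  · intro i j hi hj
    have hmf : mfun (EB pat) i j
        = if i = pat.length then (if j = pat.length then 2 else 0) else cnt pat i j := by
      unfold mfun EB
      rw [dif_pos ⟨hi, hj⟩]
    rw [hmf]
    by_cases hx : i = pat.length
    · subst hx
      rw [getD_set_self _ _ (by omega), if_pos rfl]
      by_cases hy : j = pat.length
      · subst hy
        rw [getD_set_self _ _ (by rw [hrowM]; simpa using hj), if_pos rfl]
      · rw [getD_set_ne _ _ hy, if_neg hy, hrowM, getD_replicate_zero]
    · rw [getD_set_ne _ _ hx, if_neg hx]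
      exact (hdone i (by omega) j) ▸ Int.ModEq.refl _

-- short names for the two ports' matrices (proof-only abbreviations)
def bmatA (pat : List Char) : List (List Int) :=
  (List.range pat.length).foldl (fun B state =>
      (['0', '1']).foldl (fun B digit =>
        let kk := kmpStep pat (buildPrefixA pat) digit state
        B.set state ((B.getD state []).set kk ((B.getD state []).getD kk 0 + 1))) B)
    (List.replicate (pat.length + 1) (List.replicate (pat.length + 1) (0 : Int)))

def bfinA (pat : List Char) : List (List Int) :=
  (bmatA pat).set pat.length (((bmatA pat).getD pat.length []).set pat.length 2)

def autListB (pat alphabet : List Char) : List (PySem.Dict Char Nat) :=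
  ((List.range pat.length).foldl
    (fun (st : List (PySem.Dict Char Nat) × Nat) s =>
      let aut := st.1 ++ [autRowB pat alphabet st.1 st.2 s]
      (aut, if s ≠ 0 then (aut.getD st.2 .empty).getD (pat.getD s ' ') 0 else st.2))
    ([], 0)).1

theorem compute_reference_py_eq (N : Int) (pattern : String) (MOD : Int) :
    compute_reference_py N pattern MOD = compute_reference_py_alt N pattern MOD := by
  by_cases hM : pattern.toList.length = 0
  · simp only [compute_reference_py, compute_reference_py_alt, hM, if_pos,
      List.range_zero, List.foldl_nil]
    show PySem.Int.mod 0 MOD = 0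
    exact Int.zero_fmod MOD
  · have hM' : 0 < pattern.toList.length := Nat.pos_of_ne_zero hM
    set pat := pattern.toList with hpat
    set alphabet := PySem.List.sorted (PySem.Set.ofList ('0' :: '1' :: pat)) (fun c => c) false
      with halph
    show PySem.Int.mod ((List.range pat.length).foldl
        (fun acc j => acc + (((matPowA (bfinA pat) N MOD)).getD 0 []).getD j 0) 0) MOD
      = if pat.length = 0 then 0
        else PySem.Int.mod ((mpowB pat.length MOD (matTB pat.length (autListB pat alphabet)) N).getD 0 []).sum MOD
    rw [if_neg hM]
    have hmem : ∀ c, c ∈ alphabet ↔ c ∈ ('0' :: '1' :: pat) := by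
      intro c; rw [halph, PySem.List.mem_sorted, PySem.Set.mem_ofList]
    have h0 : '0' ∈ alphabet := (hmem _).mpr (by simp)
    have h1 : '1' ∈ alphabet := (hmem _).mpr (by simp)
    have hpatmem : ∀ u, u < pat.length → pat.getD u ' ' ∈ alphabet := by
      intro u hu
      refine (hmem _).mpr (List.mem_cons_of_mem _ (List.mem_cons_of_mem _ ?_))
      rw [getD_eq_getElem' pat ' ' u hu]
      exact List.getElem_mem _
    -- B-side congruence
    have hCFT : CF MOD pat.length (matTB pat.length (autListB pat alphabet)) (mfun (ET pat)) :=
      matTB_CF MOD pat alphabet hpatmem h0 h1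
    have hCFpowB := mpowB_CF MOD pat.length _ (ET pat) hCFT N.toNat N (le_refl _)
    -- A-side congruence
    have hCFA : CF MOD (pat.length + 1) (bfinA pat) (mfun (EB pat)) :=
      matA_CF MOD pat (bmatA pat) (matA_inv pat pat.length (le_refl _))
    have hCFpowA := matPowA_CF hCFA N
    have hpoint : ∀ j, j < pat.length →
        mfun (EB pat ^ N.toNat) 0 j = mfun (ET pat ^ N.toNat) 0 j := by
      intro j hj
      unfold mfun
      rw [dif_pos ⟨by omega, by omega⟩, dif_pos ⟨hM', hj⟩]
      exact EB_block pat N.toNat ⟨0, hM'⟩ ⟨j, hj⟩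
    rw [PySem.List.foldl_add, zero_add, sum_map_range_eq]
    apply pymod_congr
    have hA : (∑ j ∈ Finset.range pat.length,
          ((matPowA (bfinA pat) N MOD).getD 0 []).getD j 0)
        ≡ ∑ j ∈ Finset.range pat.length, mfun (ET pat ^ N.toNat) 0 j [ZMOD MOD] := by
      apply Int.ModEq.sum
      intro j hj
      have hj' := Finset.mem_range.mp hj
      calc ((matPowA (bfinA pat) N MOD).getD 0 []).getD j 0
          ≡ mfun (EB pat ^ N.toNat) 0 j [ZMOD MOD] := hCFpowA.2.2 0 j (by omega) (by omega)
        _ = mfun (ET pat ^ N.toNat) 0 j := hpoint j hj'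
    set P := mpowB pat.length MOD (matTB pat.length (autListB pat alphabet)) N with hP
    have hrow0len : (P.getD 0 []).length = pat.length := by
      have h00 : 0 < P.length := by rw [hCFpowB.1]; omega
      apply hCFpowB.2.1
      rw [getD_eq_getElem' _ _ 0 h00]
      exact List.getElem_mem _
    have hB : (P.getD 0 []).sum
        ≡ ∑ j ∈ Finset.range pat.length, mfun (ET pat ^ N.toNat) 0 j [ZMOD MOD] := by
      have h := listSum_congr MOD (P.getD 0 [])
        (fun j => mfun (ET pat ^ N.toNat) 0 j)
        (fun j hj => hCFpowB.2.2 0 j (by omega) (by rw [hrow0len] at hj; omega))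
      rwa [hrow0len] at h
    exact hA.trans hB.symm

-- ===== VERDICT (by name: the statement is the Claim_ definition above) =====
theorem compute_reference_py_spec : Claim_equal_compute_reference_py := by
  intro N pattern MOD _ _
  show _ = _
  exact compute_reference_py_eq N pattern MOD
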